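-- pv_equiv track=rewrite | github.com/rehans-Life/Data-Structures-And-Algorithms | Binary Search/doubleHelix.py | doubleHelix
-- ===== SOURCE A (Python) =====
-- def doubleHelix(arr1,arr2,n,m):
--     i = 0
--     j = 0
--
--     maxSum = 0
--
--     currSum1 = 0
--     currSum2 = 0
--
--     while i < n and j < m:
--
--         if arr1[i] == arr2[j]:
--             maxSum+=(max(currSum1,currSum2)+arr2[j])
--             currSum1 = 0
--             currSum2 = 0
--             i+=1
--             j+=1
--         elif arr1[i] > arr2[j]:
--             currSum2+=arr2[j]
--             j+=1
--         else:
--             currSum1+=arr1[i]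
--             i+=1
--
--     if i < n:
--         while i < n:
--             currSum1+=arr1[i]
--             i+=1
--         maxSum+=max(currSum1,currSum2)
--
--     if j < m:
--         while j < m:
--             currSum2+=arr2[j]
--             j+=1
--
--         maxSum+=max(currSum1,currSum2)
--
--     return maxSum
-- ===== SOURCE B (Python) =====
-- def doubleHelix(arr1, arr2, n, m):
--     # Phase 1: two-pointer merge that only records the common boundary index pairs.
--     bounds = []
--     i = 0
--     j = 0
--     while i < n and j < m:
--         if arr1[i] == arr2[j]:
--             bounds.append((i, j))
--             i += 1
--             j += 1
--         elif arr1[i] > arr2[j]: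
--             j += 1
--         else:
--             i += 1
--     # Phase 2: prefix sums, then one pass over the boundaries using prefix differences.
--     n1 = max(n, 0)
--     m1 = max(m, 0)
--     pre1 = _prefixSums(arr1[:n1])
--     pre2 = _prefixSums(arr2[:m1])
--     total = 0
--     pi = 0
--     pj = 0
--     for bi, bj in bounds:
--         total += max(pre1[bi] - pre1[pi], pre2[bj] - pre2[pj]) + arr1[bi]
--         pi = bi + 1
--         pj = bj + 1
--     total += max(pre1[n1] - pre1[pi], pre2[m1] - pre2[pj])
--     return total
--
--
-- def _prefixSums(xs):
--     ps = [0]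
--     s = 0
--     for v in xs:
--         s += v
--         ps.append(s)
--     return ps
-- ===== Notes on version B (the rewrite author's own statement) =====
-- stated objective: alternative
-- what changed: A's single interleaved loop with running segment accumulators and two conditional tail loops is replaced by a two-phase decomposition: a merge pass that only collects the common boundary index pairs, then prefix-sum arrays and a single unconditional pass over the boundaries computing every segment (including the tail) by prefix difference.
import Mathlib
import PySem

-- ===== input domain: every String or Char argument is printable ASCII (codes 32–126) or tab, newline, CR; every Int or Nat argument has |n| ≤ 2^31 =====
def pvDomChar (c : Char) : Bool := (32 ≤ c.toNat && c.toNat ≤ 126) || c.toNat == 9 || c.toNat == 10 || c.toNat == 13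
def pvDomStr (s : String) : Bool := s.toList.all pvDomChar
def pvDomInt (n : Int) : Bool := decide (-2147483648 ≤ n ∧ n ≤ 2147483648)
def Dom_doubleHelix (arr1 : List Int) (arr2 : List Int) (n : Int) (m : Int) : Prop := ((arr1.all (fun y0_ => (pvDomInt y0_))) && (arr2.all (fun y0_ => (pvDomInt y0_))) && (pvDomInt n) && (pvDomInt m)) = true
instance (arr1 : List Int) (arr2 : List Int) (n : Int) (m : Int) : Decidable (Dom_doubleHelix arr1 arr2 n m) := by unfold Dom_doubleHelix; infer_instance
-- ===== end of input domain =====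

-- B replaces A's single interleaved accumulation by a two-phase decomposition: a merge pass that
-- only collects the common boundary index pairs, then prefix-sum arrays and one pass over the
-- boundaries computing each segment by prefix difference (objective: alternative decomposition).

-- ===== PORT A =====
-- the trailing 'while i < n: currSum1 += arr1[i]; i += 1' loops of A
-- (fuel is a totality guard only; it is always called with fuel = (lim - k).toNat, enough to
-- reach the loop exit exactly as the Python does)
def pvTailA (xs : List Int) (lim : Int) : Nat → Int → Int → Int
  | 0, _, acc => acc
  | fuel + 1, k, acc =>
    if k < lim then pvTailA xs lim fuel (k + 1) (acc + (PySem.List.pyGet? xs k).getD 0) else acc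

-- A's code after the main loop: the two tail conditionals
def pvExitA (arr1 arr2 : List Int) (n m i j maxSum c1 c2 : Int) : Int :=
  let p := if i < n then
      (maxSum + max (pvTailA arr1 n (n - i).toNat i c1) c2, pvTailA arr1 n (n - i).toNat i c1)
    else (maxSum, c1)
  if j < m then p.1 + max p.2 (pvTailA arr2 m (m - j).toNat j c2) else p.1

-- A's main 'while i < n and j < m' loop (fuel ≥ (n-i)+(m-j) suffices, so the guard never fires
-- before the Python loop exits)
def pvLoopA (arr1 arr2 : List Int) (n m : Int) : Nat → Int → Int → Int → Int → Int → Int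
  | 0, i, j, maxSum, c1, c2 => pvExitA arr1 arr2 n m i j maxSum c1 c2
  | fuel + 1, i, j, maxSum, c1, c2 =>
    if i < n ∧ j < m then
      if (PySem.List.pyGet? arr1 i).getD 0 = (PySem.List.pyGet? arr2 j).getD 0 then
        pvLoopA arr1 arr2 n m fuel (i + 1) (j + 1)
          (maxSum + (max c1 c2 + (PySem.List.pyGet? arr2 j).getD 0)) 0 0
      else if (PySem.List.pyGet? arr1 i).getD 0 > (PySem.List.pyGet? arr2 j).getD 0 then
        pvLoopA arr1 arr2 n m fuel i (j + 1) maxSum c1 (c2 + (PySem.List.pyGet? arr2 j).getD 0)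
      else
        pvLoopA arr1 arr2 n m fuel (i + 1) j maxSum (c1 + (PySem.List.pyGet? arr1 i).getD 0) c2
    else pvExitA arr1 arr2 n m i j maxSum c1 c2

def doubleHelix (arr1 : List Int) (arr2 : List Int) (n : Int) (m : Int) : Int :=
  pvLoopA arr1 arr2 n m (n.toNat + m.toNat) 0 0 0 0 0

-- ===== PORT B =====
-- phase 1 of B: the two-pointer merge that only records the common boundary index pairs
-- (same fuel guard as on A's loop)
def pvBounds (arr1 arr2 : List Int) (n m : Int) : Nat → Int → Int → List (Int × Int) → List (Int × Int)
  | 0, _, _, acc => acc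
  | fuel + 1, i, j, acc =>
    if i < n ∧ j < m then
      if (PySem.List.pyGet? arr1 i).getD 0 = (PySem.List.pyGet? arr2 j).getD 0 then
        pvBounds arr1 arr2 n m fuel (i + 1) (j + 1) (acc ++ [(i, j)])
      else if (PySem.List.pyGet? arr1 i).getD 0 > (PySem.List.pyGet? arr2 j).getD 0 then
        pvBounds arr1 arr2 n m fuel i (j + 1) acc
      else
        pvBounds arr1 arr2 n m fuel (i + 1) j acc
    else acc

-- Source B's _prefixSums: ps = [0]; for v in xs: s += v; ps.append(s)
def pvPrefix (xs : List Int) : List Int :=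
  (xs.foldl (fun p v => (p.1 ++ [p.2 + v], p.2 + v)) ([0], 0)).1

def pvPre1get (ps : List Int) (k : Int) : Int := (PySem.List.pyGet? ps k).getD 0

-- one iteration of B's second loop over the boundary pairs; state = (total, pi, pj)
def pvStep (arr1 pre1 pre2 : List Int) (st : Int × Int × Int) (bp : Int × Int) : Int × Int × Int :=
  (st.1 + max (pvPre1get pre1 bp.1 - pvPre1get pre1 st.2.1)
              (pvPre1get pre2 bp.2 - pvPre1get pre2 st.2.2)
        + (PySem.List.pyGet? arr1 bp.1).getD 0,
   bp.1 + 1, bp.2 + 1)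

def doubleHelix_alt (arr1 : List Int) (arr2 : List Int) (n : Int) (m : Int) : Int :=
  let bounds := pvBounds arr1 arr2 n m (n.toNat + m.toNat) 0 0 []
  let n1 := max n 0
  let m1 := max m 0
  let pre1 := pvPrefix (PySem.List.slice arr1 none (some n1))
  let pre2 := pvPrefix (PySem.List.slice arr2 none (some m1))
  let r := bounds.foldl (pvStep arr1 pre1 pre2) (0, 0, 0)
  r.1 + max (pvPre1get pre1 n1 - pvPre1get pre1 r.2.1)
            (pvPre1get pre2 m1 - pvPre1get pre2 r.2.2)

-- ===== PRECONDITION & SPEC =====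
-- Exactly the inputs on which A returns: whenever n > len(arr1) or m > len(arr2), A's loops
-- eventually index past the end and raise IndexError (negative n or m are fine and admitted).
def Pre_doubleHelix (arr1 : List Int) (arr2 : List Int) (n : Int) (m : Int) : Prop :=
  n ≤ arr1.length ∧ m ≤ arr2.length

instance (arr1 : List Int) (arr2 : List Int) (n : Int) (m : Int) : Decidable (Pre_doubleHelix arr1 arr2 n m) := by unfold Pre_doubleHelix; infer_instance

def pvWitness_doubleHelix : List Int × List Int × Int × Int := ([1, 3, 5], [2, 3, 4, 5], 3, 4)

def Spec_doubleHelix (arr1 : List Int) (arr2 : List Int) (n : Int) (m : Int) (out : Int) : Prop := out = doubleHelix_alt arr1 arr2 n m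
instance (arr1 : List Int) (arr2 : List Int) (n : Int) (m : Int) (out : Int) : Decidable (Spec_doubleHelix arr1 arr2 n m out) := by unfold Spec_doubleHelix; infer_instance

-- ===== CLAIM (what is proved, stated in full; the proofs are below) =====
def Claim_equal_doubleHelix : Prop := ∀ (arr1 : List Int) (arr2 : List Int) (n : Int) (m : Int), Dom_doubleHelix arr1 arr2 n m → Pre_doubleHelix arr1 arr2 n m → Spec_doubleHelix arr1 arr2 n m (doubleHelix arr1 arr2 n m)

-- ===== LEMMAS AND PROOFS =====

-- one-step unfolding lemmas for the two loops
lemma pvBounds_stop (arr1 arr2 : List Int) (n m : Int) (fuel : Nat) (i j : Int)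
    (acc : List (Int × Int)) (h : ¬(i < n ∧ j < m)) :
    pvBounds arr1 arr2 n m fuel i j acc = acc := by
  cases fuel with
  | zero => rfl
  | succ f => rw [pvBounds, if_neg h]

lemma pvBounds_step_eq (arr1 arr2 : List Int) (n m : Int) (fuel : Nat) (i j : Int)
    (acc : List (Int × Int)) (h : i < n ∧ j < m)
    (hxy : (PySem.List.pyGet? arr1 i).getD 0 = (PySem.List.pyGet? arr2 j).getD 0) :
    pvBounds arr1 arr2 n m (fuel + 1) i j acc
      = pvBounds arr1 arr2 n m fuel (i + 1) (j + 1) (acc ++ [(i, j)]) := by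
  rw [pvBounds, if_pos h, if_pos hxy]

lemma pvBounds_step_gt (arr1 arr2 : List Int) (n m : Int) (fuel : Nat) (i j : Int)
    (acc : List (Int × Int)) (h : i < n ∧ j < m)
    (hxy : ¬ (PySem.List.pyGet? arr1 i).getD 0 = (PySem.List.pyGet? arr2 j).getD 0)
    (hgt : (PySem.List.pyGet? arr1 i).getD 0 > (PySem.List.pyGet? arr2 j).getD 0) :
    pvBounds arr1 arr2 n m (fuel + 1) i j acc = pvBounds arr1 arr2 n m fuel i (j + 1) acc := by
  rw [pvBounds, if_pos h, if_neg hxy, if_pos hgt]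

lemma pvBounds_step_lt (arr1 arr2 : List Int) (n m : Int) (fuel : Nat) (i j : Int)
    (acc : List (Int × Int)) (h : i < n ∧ j < m)
    (hxy : ¬ (PySem.List.pyGet? arr1 i).getD 0 = (PySem.List.pyGet? arr2 j).getD 0)
    (hgt : ¬ (PySem.List.pyGet? arr1 i).getD 0 > (PySem.List.pyGet? arr2 j).getD 0) :
    pvBounds arr1 arr2 n m (fuel + 1) i j acc = pvBounds arr1 arr2 n m fuel (i + 1) j acc := by
  rw [pvBounds, if_pos h, if_neg hxy, if_neg hgt]

lemma pvLoopA_step_eq (arr1 arr2 : List Int) (n m : Int) (fuel : Nat) (i j S c1 c2 : Int)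
    (h : i < n ∧ j < m)
    (hxy : (PySem.List.pyGet? arr1 i).getD 0 = (PySem.List.pyGet? arr2 j).getD 0) :
    pvLoopA arr1 arr2 n m (fuel + 1) i j S c1 c2
      = pvLoopA arr1 arr2 n m fuel (i + 1) (j + 1)
          (S + (max c1 c2 + (PySem.List.pyGet? arr2 j).getD 0)) 0 0 := by
  rw [pvLoopA, if_pos h, if_pos hxy]

lemma pvLoopA_step_gt (arr1 arr2 : List Int) (n m : Int) (fuel : Nat) (i j S c1 c2 : Int)
    (h : i < n ∧ j < m)
    (hxy : ¬ (PySem.List.pyGet? arr1 i).getD 0 = (PySem.List.pyGet? arr2 j).getD 0)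
    (hgt : (PySem.List.pyGet? arr1 i).getD 0 > (PySem.List.pyGet? arr2 j).getD 0) :
    pvLoopA arr1 arr2 n m (fuel + 1) i j S c1 c2
      = pvLoopA arr1 arr2 n m fuel i (j + 1) S c1 (c2 + (PySem.List.pyGet? arr2 j).getD 0) := by
  rw [pvLoopA, if_pos h, if_neg hxy, if_pos hgt]

lemma pvLoopA_step_lt (arr1 arr2 : List Int) (n m : Int) (fuel : Nat) (i j S c1 c2 : Int)
    (h : i < n ∧ j < m)
    (hxy : ¬ (PySem.List.pyGet? arr1 i).getD 0 = (PySem.List.pyGet? arr2 j).getD 0)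
    (hgt : ¬ (PySem.List.pyGet? arr1 i).getD 0 > (PySem.List.pyGet? arr2 j).getD 0) :
    pvLoopA arr1 arr2 n m (fuel + 1) i j S c1 c2
      = pvLoopA arr1 arr2 n m fuel (i + 1) j S (c1 + (PySem.List.pyGet? arr1 i).getD 0) c2 := by
  rw [pvLoopA, if_pos h, if_neg hxy, if_neg hgt]

lemma pvLoopA_stop (arr1 arr2 : List Int) (n m : Int) (fuel : Nat) (i j S c1 c2 : Int)
    (h : ¬(i < n ∧ j < m)) :
    pvLoopA arr1 arr2 n m fuel i j S c1 c2 = pvExitA arr1 arr2 n m i j S c1 c2 := by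
  cases fuel with
  | zero => rfl
  | succ f => rw [pvLoopA, if_neg h]

lemma pvExitA_eq (arr1 arr2 : List Int) (n m i j S c1 c2 : Int) :
    pvExitA arr1 arr2 n m i j S c1 c2
      = (if j < m
          then (if i < n
                then (S + max (pvTailA arr1 n (n - i).toNat i c1) c2,
                      pvTailA arr1 n (n - i).toNat i c1)
                else (S, c1)).1
              + max (if i < n
                     then (S + max (pvTailA arr1 n (n - i).toNat i c1) c2,
                           pvTailA arr1 n (n - i).toNat i c1)
                     else (S, c1)).2 (pvTailA arr2 m (m - j).toNat j c2)
          else (if i < n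
                then (S + max (pvTailA arr1 n (n - i).toNat i c1) c2,
                      pvTailA arr1 n (n - i).toNat i c1)
                else (S, c1)).1) := rfl

-- sum of xs[a:b] for 0 ≤ a (the segment sums both programs are about)
def pvSeg (xs : List Int) (a b : Int) : Int := ((xs.take b.toNat).drop a.toNat).sum

lemma pvSeg_self (xs : List Int) (a : Int) : pvSeg xs a a = 0 := by
  unfold pvSeg
  rw [List.drop_eq_nil_of_le (by simp)]
  rfl

lemma pvSeg_succ (xs : List Int) (a k : Int) (h0 : 0 ≤ a) (hak : a ≤ k)
    (hk : k < (xs.length : Int)) :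
    pvSeg xs a (k + 1) = pvSeg xs a k + (PySem.List.pyGet? xs k).getD 0 := by
  unfold pvSeg
  have hklen : k.toNat < xs.length := by omega
  have h1 : (k + 1).toNat = k.toNat + 1 := by omega
  rw [h1, List.take_add_one, List.getElem?_eq_getElem hklen]
  rw [List.drop_append]
  have hlen : (xs.take k.toNat).length = k.toNat := by simp; omega
  rw [List.sum_append]
  have h2 : a.toNat - (xs.take k.toNat).length = 0 := by omega
  rw [h2, List.drop_zero]
  have h3 : (PySem.List.pyGet? xs k).getD 0 = xs[k.toNat] := by
    simp [PySem.List.pyGet?_of_nonneg xs (show (0:Int) ≤ k by omega), List.getElem?_eq_getElem hklen]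
  simp [h3]

lemma pvSeg_cat (xs : List Int) (a b c : Int) (h0 : 0 ≤ a) (hab : a ≤ b) (hbc : b ≤ c) :
    pvSeg xs a b + pvSeg xs b c = pvSeg xs a c := by
  unfold pvSeg
  have h1 : xs.take b.toNat = (xs.take c.toNat).take b.toNat := by
    rw [List.take_take]; congr 1; omega
  rw [h1]
  set l := xs.take c.toNat with hl
  have h2 : l = l.take b.toNat ++ l.drop b.toNat := (List.take_append_drop _ _).symm
  conv_rhs => rw [h2]
  rw [List.drop_append, List.sum_append]
  congr 1
  by_cases hbl : b.toNat ≤ l.length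
  · have : (l.take b.toNat).length = b.toNat := by simp; omega
    rw [this]
    have : a.toNat - b.toNat = 0 := by omega
    rw [this, List.drop_zero]
  · have hnil : l.drop b.toNat = [] := List.drop_eq_nil_of_le (by omega)
    rw [hnil]
    simp

lemma pvTailA_eq (xs : List Int) (lim : Int) : ∀ (fuel : Nat) (k acc : Int),
    (lim - k).toNat ≤ fuel → 0 ≤ k → k ≤ lim → lim ≤ (xs.length : Int) →
    pvTailA xs lim fuel k acc = acc + pvSeg xs k lim := by
  intro fuel
  induction fuel with
  | zero =>
    intro k acc hf h0 hk hl
    have : k = lim := by omega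
    subst this
    rw [pvTailA, pvSeg_self]
    ring
  | succ f ih =>
    intro k acc hf h0 hk hl
    by_cases h : k < lim
    · rw [pvTailA, if_pos h]
      rw [ih (k + 1) _ (by omega) (by omega) (by omega) hl]
      have hstep : pvSeg xs k (k + 1) = (PySem.List.pyGet? xs k).getD 0 := by
        rw [pvSeg_succ xs k k h0 le_rfl (by omega), pvSeg_self]
        ring
      have hcat : pvSeg xs k (k + 1) + pvSeg xs (k + 1) lim = pvSeg xs k lim :=
        pvSeg_cat xs k (k + 1) lim h0 (by omega) (by omega)
      omega
    · rw [pvTailA, if_neg h]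
      have : k = lim := by omega
      subst this
      rw [pvSeg_self]
      ring

def pvPsList : Int → List Int → List Int
  | _, [] => []
  | s, v :: t => (s + v) :: pvPsList (s + v) t

lemma pvFoldl_prefix (xs : List Int) : ∀ (ps0 : List Int) (s0 : Int),
    xs.foldl (fun p v => (p.1 ++ [p.2 + v], p.2 + v)) (ps0, s0)
      = (ps0 ++ pvPsList s0 xs, s0 + xs.sum) := by
  induction xs with
  | nil => intro ps0 s0; simp [pvPsList]
  | cons v t ih =>
    intro ps0 s0
    simp only [List.foldl_cons, ih, pvPsList, List.sum_cons]
    rw [Prod.mk.injEq]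
    refine ⟨by simp, by ring⟩

lemma pvPsList_get : ∀ (xs : List Int) (s : Int) (t : Nat), t < xs.length →
    (pvPsList s xs)[t]? = some (s + (xs.take (t + 1)).sum) := by
  intro xs
  induction xs with
  | nil => intro s t h; simp at h
  | cons v tl ih =>
    intro s t h
    cases t with
    | zero => simp [pvPsList]
    | succ t' =>
      simp only [pvPsList, List.getElem?_cons_succ]
      rw [ih (s + v) t' (by simpa using h)]
      simp [List.take_succ_cons]
      ring

-- the prefix-sum list evaluated at a valid index is the prefix sum
lemma pvPrefix_get (xs : List Int) (k : Int) (h0 : 0 ≤ k) (hk : k ≤ (xs.length : Int)) :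
    pvPre1get (pvPrefix xs) k = (xs.take k.toNat).sum := by
  unfold pvPre1get pvPrefix
  rw [pvFoldl_prefix xs [0] 0]
  simp only [List.singleton_append]
  rw [PySem.List.pyGet?_of_nonneg _ h0]
  rcases Nat.eq_zero_or_pos k.toNat with hz | hp
  · rw [hz]; simp
  · obtain ⟨t, ht⟩ : ∃ t, k.toNat = t + 1 := ⟨k.toNat - 1, by omega⟩
    rw [ht]
    show ((0 :: pvPsList 0 xs)[t+1]?).getD 0 = _
    rw [List.getElem?_cons_succ, pvPsList_get xs 0 t (by omega)]
    simp

-- prefix difference over the sliced array is the segment sum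
lemma pvPreDiff (xs : List Int) (L a b : Int) (hL : 0 ≤ L) (hLlen : L ≤ (xs.length : Int))
    (h0 : 0 ≤ a) (hab : a ≤ b) (hb : b ≤ L) :
    pvPre1get (pvPrefix (PySem.List.slice xs none (some L))) b
      - pvPre1get (pvPrefix (PySem.List.slice xs none (some L))) a = pvSeg xs a b := by
  rw [PySem.List.slice_to xs hL]
  have hlt : ((xs.take L.toNat).length : Int) = L := by simp; omega
  rw [pvPrefix_get _ b (by omega) (by omega), pvPrefix_get _ a h0 (by omega)]
  have htb : (xs.take L.toNat).take b.toNat = xs.take b.toNat := by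
    rw [List.take_take]; congr 1; omega
  have hta : (xs.take L.toNat).take a.toNat = xs.take a.toNat := by
    rw [List.take_take]; congr 1; omega
  rw [htb, hta]
  have hcat := pvSeg_cat xs 0 a b le_rfl h0 hab
  have ha : pvSeg xs 0 a = (xs.take a.toNat).sum := by unfold pvSeg; simp
  have hb : pvSeg xs 0 b = (xs.take b.toNat).sum := by unfold pvSeg; simp
  omega

lemma pvBounds_acc (arr1 arr2 : List Int) (n m : Int) :
    ∀ (fuel : Nat) (i j : Int) (acc : List (Int × Int)),
      pvBounds arr1 arr2 n m fuel i j acc = acc ++ pvBounds arr1 arr2 n m fuel i j [] := by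
  intro fuel
  induction fuel with
  | zero => intro i j acc; simp [pvBounds]
  | succ F ih =>
    intro i j acc
    by_cases hc : i < n ∧ j < m
    · by_cases hxy : (PySem.List.pyGet? arr1 i).getD 0 = (PySem.List.pyGet? arr2 j).getD 0
      · rw [pvBounds_step_eq arr1 arr2 n m F i j acc hc hxy,
            pvBounds_step_eq arr1 arr2 n m F i j [] hc hxy,
            ih (i + 1) (j + 1) (acc ++ [(i, j)]),
            ih (i + 1) (j + 1) ([] ++ [(i, j)])]
        simp
      · by_cases hgt : (PySem.List.pyGet? arr1 i).getD 0 > (PySem.List.pyGet? arr2 j).getD 0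
        · rw [pvBounds_step_gt arr1 arr2 n m F i j acc hc hxy hgt,
              pvBounds_step_gt arr1 arr2 n m F i j [] hc hxy hgt]
          exact ih i (j + 1) acc
        · rw [pvBounds_step_lt arr1 arr2 n m F i j acc hc hxy hgt,
              pvBounds_step_lt arr1 arr2 n m F i j [] hc hxy hgt]
          exact ih (i + 1) j acc
    · rw [pvBounds_stop arr1 arr2 n m _ i j acc hc, pvBounds_stop arr1 arr2 n m _ i j [] hc]
      simp

-- B's second phase from an arbitrary state, as a function of the remaining boundary list
def pvValB (arr1 arr2 : List Int) (n m : Int) (l : List (Int × Int)) (S pi pj : Int) : Int :=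
  let pre1 := pvPrefix (PySem.List.slice arr1 none (some (max n 0)))
  let pre2 := pvPrefix (PySem.List.slice arr2 none (some (max m 0)))
  let r := l.foldl (pvStep arr1 pre1 pre2) (S, pi, pj)
  r.1 + max (pvPre1get pre1 (max n 0) - pvPre1get pre1 r.2.1)
            (pvPre1get pre2 (max m 0) - pvPre1get pre2 r.2.2)

lemma pvValB_nil (arr1 arr2 : List Int) (n m S pi pj : Int) :
    pvValB arr1 arr2 n m [] S pi pj
      = S + max (pvPre1get (pvPrefix (PySem.List.slice arr1 none (some (max n 0)))) (max n 0)
                 - pvPre1get (pvPrefix (PySem.List.slice arr1 none (some (max n 0)))) pi)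
                (pvPre1get (pvPrefix (PySem.List.slice arr2 none (some (max m 0)))) (max m 0)
                 - pvPre1get (pvPrefix (PySem.List.slice arr2 none (some (max m 0)))) pj) := rfl

lemma pvValB_cons (arr1 arr2 : List Int) (n m : Int) (bp : Int × Int) (l : List (Int × Int))
    (S pi pj : Int) :
    pvValB arr1 arr2 n m (bp :: l) S pi pj
      = pvValB arr1 arr2 n m l
          (S + max (pvPre1get (pvPrefix (PySem.List.slice arr1 none (some (max n 0)))) bp.1
                    - pvPre1get (pvPrefix (PySem.List.slice arr1 none (some (max n 0)))) pi)
                   (pvPre1get (pvPrefix (PySem.List.slice arr2 none (some (max m 0)))) bp.2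
                    - pvPre1get (pvPrefix (PySem.List.slice arr2 none (some (max m 0)))) pj)
             + (PySem.List.pyGet? arr1 bp.1).getD 0)
          (bp.1 + 1) (bp.2 + 1) := rfl

-- A's exit code (the two tail conditionals) agrees with B's final prefix-difference term
lemma pvExit (arr1 arr2 : List Int) (n m : Int) (hn : n ≤ (arr1.length : Int))
    (hm : m ≤ (arr2.length : Int)) (i j pi pj S : Int) (hc : ¬(i < n ∧ j < m))
    (h1 : 0 ≤ pi) (h2 : pi ≤ i) (h3 : i ≤ max n 0)
    (h4 : 0 ≤ pj) (h5 : pj ≤ j) (h6 : j ≤ max m 0)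
    (hC : (n ≤ i ∧ m ≤ j) → (pi = i ∧ pj = j)) :
    pvExitA arr1 arr2 n m i j S (pvSeg arr1 pi i) (pvSeg arr2 pj j)
      = pvValB arr1 arr2 n m [] S pi pj := by
  rw [pvExitA_eq, pvValB_nil]
  rw [pvPreDiff arr1 (max n 0) pi (max n 0) (by omega) (by omega) h1 (by omega) le_rfl]
  rw [pvPreDiff arr2 (max m 0) pj (max m 0) (by omega) (by omega) h4 (by omega) le_rfl]
  by_cases hi : i < n
  · have hj : ¬ j < m := fun h => hc ⟨hi, h⟩
    rw [if_neg hj, if_pos hi]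
    dsimp only
    rw [pvTailA_eq arr1 n _ i _ le_rfl (by omega) (by omega) hn]
    have hn1 : max n 0 = n := by omega
    have hj1 : j = max m 0 := by omega
    rw [pvSeg_cat arr1 pi i n h1 h2 (by omega), hn1, hj1]
  · by_cases hj : j < m
    · rw [if_pos hj, if_neg hi]
      dsimp only
      rw [pvTailA_eq arr2 m _ j _ le_rfl (by omega) (by omega) hm]
      have hm1 : max m 0 = m := by omega
      have hi1 : i = max n 0 := by omega
      rw [pvSeg_cat arr2 pj j m h4 h5 (by omega), hm1, hi1]
    · rw [if_neg hj, if_neg hi]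
      dsimp only
      obtain ⟨hpi, hpj⟩ := hC ⟨by omega, by omega⟩
      have hi1 : pi = max n 0 := by omega
      have hj1 : pj = max m 0 := by omega
      rw [hi1, hj1, pvSeg_self, pvSeg_self]
      simp

lemma pvMain (arr1 arr2 : List Int) (n m : Int) (hn : n ≤ (arr1.length : Int))
    (hm : m ≤ (arr2.length : Int)) :
    ∀ (fuel : Nat) (i j pi pj S : Int), ((n - i).toNat + (m - j).toNat) ≤ fuel →
      0 ≤ pi → pi ≤ i → i ≤ max n 0 → 0 ≤ pj → pj ≤ j → j ≤ max m 0 →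
      ((n ≤ i ∧ m ≤ j) → (pi = i ∧ pj = j)) →
      pvLoopA arr1 arr2 n m fuel i j S (pvSeg arr1 pi i) (pvSeg arr2 pj j)
        = pvValB arr1 arr2 n m (pvBounds arr1 arr2 n m fuel i j []) S pi pj := by
  intro fuel
  induction fuel with
  | zero =>
    intro i j pi pj S hF h1 h2 h3 h4 h5 h6 hC
    have hc : ¬(i < n ∧ j < m) := by omega
    rw [pvBounds_stop arr1 arr2 n m _ i j [] hc, pvLoopA_stop arr1 arr2 n m _ i j _ _ _ hc]
    exact pvExit arr1 arr2 n m hn hm i j pi pj S hc h1 h2 h3 h4 h5 h6 hC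
  | succ F ih =>
    intro i j pi pj S hF h1 h2 h3 h4 h5 h6 hC
    by_cases hc : i < n ∧ j < m
    · by_cases hxy : (PySem.List.pyGet? arr1 i).getD 0 = (PySem.List.pyGet? arr2 j).getD 0
      · rw [pvLoopA_step_eq arr1 arr2 n m F i j _ _ _ hc hxy,
            pvBounds_step_eq arr1 arr2 n m F i j [] hc hxy,
            pvBounds_acc arr1 arr2 n m F (i + 1) (j + 1) ([] ++ [(i, j)])]
        simp only [List.nil_append, List.singleton_append]
        rw [pvValB_cons]
        have hih := ih (i + 1) (j + 1) (i + 1) (j + 1)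
          (S + (max (pvSeg arr1 pi i) (pvSeg arr2 pj j) + (PySem.List.pyGet? arr2 j).getD 0))
          (by omega) (by omega) le_rfl (by omega) (by omega) le_rfl (by omega)
          (fun _ => ⟨rfl, rfl⟩)
        rw [pvSeg_self, pvSeg_self] at hih
        rw [hih]
        congr 1
        rw [pvPreDiff arr1 (max n 0) pi i (by omega) (by omega) h1 h2 h3,
            pvPreDiff arr2 (max m 0) pj j (by omega) (by omega) h4 h5 h6]
        dsimp only
        rw [hxy]
        ring
      · by_cases hgt : (PySem.List.pyGet? arr1 i).getD 0 > (PySem.List.pyGet? arr2 j).getD 0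
        · rw [pvLoopA_step_gt arr1 arr2 n m F i j _ _ _ hc hxy hgt,
              pvBounds_step_gt arr1 arr2 n m F i j [] hc hxy hgt]
          rw [← pvSeg_succ arr2 pj j h4 h5 (by omega)]
          exact ih i (j + 1) pi pj S (by omega) h1 h2 h3 h4 (by omega) (by omega)
            (fun h => absurd hc.1 (by omega))
        · rw [pvLoopA_step_lt arr1 arr2 n m F i j _ _ _ hc hxy hgt,
              pvBounds_step_lt arr1 arr2 n m F i j [] hc hxy hgt]
          rw [← pvSeg_succ arr1 pi i h1 h2 (by omega)]
          exact ih (i + 1) j pi pj S (by omega) h1 (by omega) (by omega) h4 h5 h6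
            (fun h => absurd hc.2 (by omega))
    · rw [pvBounds_stop arr1 arr2 n m _ i j [] hc, pvLoopA_stop arr1 arr2 n m _ i j _ _ _ hc]
      exact pvExit arr1 arr2 n m hn hm i j pi pj S hc h1 h2 h3 h4 h5 h6 hC

-- ===== VERDICT (by name: the statement is the Claim_ definition above) =====
theorem doubleHelix_spec : Claim_equal_doubleHelix := by
  intro arr1 arr2 n m _ hpre
  unfold Spec_doubleHelix doubleHelix doubleHelix_alt
  have h := pvMain arr1 arr2 n m hpre.1 hpre.2 (n.toNat + m.toNat) 0 0 0 0 0
    (by omega) le_rfl le_rfl (by omega) le_rfl le_rfl (by omega) (fun _ => ⟨rfl, rfl⟩)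
  simpa [pvSeg_self, pvValB] using h
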